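-- pv_equiv track=rewrite | github.com/AkunoCode/CP102-Files | Self-Practice/ISITE_DS_Algo/Practice_Problems/practice.py | shortestWord
-- ===== SOURCE A (Python) =====
-- def shortestWord(licensePlate, words):
--     licensePlate = "".join([i.lower() for i in licensePlate if i.isalpha()])
--     words = sorted(words,key=len)
--     complete = []
--     for word in words:
--         verify = True
--         for letter in licensePlate:
--             if licensePlate.count(letter) > word.count(letter) or letter not in word:
--                 verify = False
--                 break
--         if verify:
--             return word
-- ===== SOURCE B (Python) =====
-- def shortestWord(licensePlate, words):
--     need = {}
--     for ch in licensePlate: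
--         if ch.isalpha():
--             c = ch.lower()
--             need[c] = need.get(c, 0) + 1
--     best = None
--     for word in words:
--         if all(word.count(c) >= k for c, k in need.items()):
--             if best is None or len(word) < len(best):
--                 best = word
--     return best
-- ===== Notes on version B (the rewrite author's own statement) =====
-- stated objective: faster
-- what changed: B drops A's length-sort entirely: it precomputes the plate's letter counts once in a dict, then makes one linear pass over words in their given order keeping the first shortest valid word (strict < tie-break), instead of sorting words by length and scanning for the first valid one while recounting plate letters per word.
import Mathlib
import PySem

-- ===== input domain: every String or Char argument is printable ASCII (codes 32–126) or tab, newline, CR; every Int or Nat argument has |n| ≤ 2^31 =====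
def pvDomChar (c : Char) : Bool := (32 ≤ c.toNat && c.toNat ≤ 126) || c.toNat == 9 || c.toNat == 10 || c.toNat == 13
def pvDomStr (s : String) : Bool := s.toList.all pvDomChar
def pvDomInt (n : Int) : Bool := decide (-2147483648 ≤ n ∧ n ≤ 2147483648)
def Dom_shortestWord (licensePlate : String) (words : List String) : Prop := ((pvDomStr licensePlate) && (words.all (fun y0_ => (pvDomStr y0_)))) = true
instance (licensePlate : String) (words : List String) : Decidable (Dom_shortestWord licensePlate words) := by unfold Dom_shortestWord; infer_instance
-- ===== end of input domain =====

-- B replaces A's sort-then-scan by one linear pass with a precomputed letter-count dict and a best-so-far minimum (objective: faster, no sort).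

-- ===== PORT A =====
-- A's inner 'for letter in licensePlate: … break' sets verify=False on the first bad
-- letter: equivalent to 'all letters good'.  'plate.count(letter)' / 'word.count(letter)'
-- count a 1-char substring, which is exactly the char count on the char list;
-- 'letter not in word' is char membership — exact on this domain.
def pvVerifyA (plate word : List Char) : Bool :=
  plate.all (fun letter =>
    !(decide (plate.count letter > word.count letter) || !(word.contains letter)))

def pvLoopA (plate : List Char) : List String → Option String
  | [] => none
  | w :: ws => if pvVerifyA plate w.toList then some w else pvLoopA plate ws

def shortestWord (licensePlate : String) (words : List String) : Option String :=
  -- "".join([i.lower() for i in licensePlate if i.isalpha()])  (per-char lower — exact on ASCII)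
  let plate : List Char := (licensePlate.toList.filter PySem.Chars.isalpha).map PySem.Chars.lowerChar
  pvLoopA plate (PySem.List.sorted words (fun w => PySem.Str.len w))

-- ===== PORT B =====
-- need[c] = need.get(c, 0) + 1 over the alpha chars of the plate, lowercased
def pvNeed (lp : List Char) : PySem.Dict Char Int :=
  lp.foldl (fun d ch =>
    if PySem.Chars.isalpha ch then
      d.insert (PySem.Chars.lowerChar ch) (d.getD (PySem.Chars.lowerChar ch) 0 + 1)
    else d) PySem.Dict.empty

-- all(word.count(c) >= k for c, k in need.items())  (1-char substring count = char count)
def pvOkB (need : PySem.Dict Char Int) (word : String) : Bool :=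
  need.items.all (fun p => decide ((word.toList.count p.1 : Int) ≥ p.2))

def shortestWord_alt (licensePlate : String) (words : List String) : Option String :=
  let need := pvNeed licensePlate.toList
  words.foldl (fun best w =>
    if pvOkB need w then
      match best with
      | none => some w
      | some b => if PySem.Str.len w < PySem.Str.len b then some w else some b
    else best) none

-- ===== PRECONDITION & SPEC =====
def Spec_shortestWord (licensePlate : String) (words : List String) (out : Option String) : Prop := out = shortestWord_alt licensePlate words
instance (licensePlate : String) (words : List String) (out : Option String) : Decidable (Spec_shortestWord licensePlate words out) := by unfold Spec_shortestWord; infer_instance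

-- ===== CLAIM (what is proved, stated in full; the proofs are below) =====
def Claim_equal_shortestWord : Prop := ∀ (licensePlate : String) (words : List String), Dom_shortestWord licensePlate words → Spec_shortestWord licensePlate words (shortestWord licensePlate words)

-- ===== LEMMAS AND PROOFS =====

-- B's counting loop (filter+lower inline) over the raw plate equals the count loop over A's normalized plate
theorem pvNeed_foldl (lp : List Char) (d : PySem.Dict Char Int) :
    lp.foldl (fun d ch =>
      if PySem.Chars.isalpha ch then
        d.insert (PySem.Chars.lowerChar ch) (d.getD (PySem.Chars.lowerChar ch) 0 + 1)
      else d) d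
    = ((lp.filter PySem.Chars.isalpha).map PySem.Chars.lowerChar).foldl
        (fun d x => d.insert x (d.getD x 0 + 1)) d := by
  induction lp generalizing d with
  | nil => rfl
  | cons c l ih =>
    by_cases h : PySem.Chars.isalpha c = true <;> simp [h, ih]

theorem pvNeed_eq_counter (lp : List Char) :
    pvNeed lp = PySem.Dict.counter ((lp.filter PySem.Chars.isalpha).map PySem.Chars.lowerChar) := by
  unfold pvNeed
  rw [pvNeed_foldl]
  exact PySem.Dict.foldl_insert_getD_add_one_eq_counter _

-- per-word check: counter items vs A's per-letter scan (abstract plate)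
theorem okB_counter (plate : List Char) (w : String) :
    (PySem.Dict.counter plate).items.all (fun p => decide ((w.toList.count p.1 : Int) ≥ p.2))
      = pvVerifyA plate w.toList := by
  rw [Bool.eq_iff_iff, PySem.Dict.items_counter]
  unfold pvVerifyA
  simp only [List.all_map, List.all_eq_true, PySem.Set.mem_ofList]
  constructor
  · intro h letter hl
    have h1 : plate.count letter ≤ w.toList.count letter := by simpa using h letter hl
    have hpos : 0 < plate.count letter := List.count_pos_iff.mpr hl
    have hmem : letter ∈ w.toList := List.count_pos_iff.mp (lt_of_lt_of_le hpos h1)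
    simp [hmem, Nat.not_lt.mpr h1]
  · intro h k hk
    have h1 := h k hk
    simp only [Bool.not_or, Bool.and_eq_true, Bool.not_eq_true', decide_eq_false_iff_not,
      not_lt, Bool.not_not, List.contains_eq_mem, decide_eq_true_eq] at h1
    simpa using h1.1

theorem pvOkB_eq_verifyA (lp : List Char) (w : String) :
    pvOkB (pvNeed lp) w
      = pvVerifyA ((lp.filter PySem.Chars.isalpha).map PySem.Chars.lowerChar) w.toList := by
  unfold pvOkB
  rw [pvNeed_eq_counter]
  exact okB_counter _ w

-- A's loop over a list is List.find?
theorem pvLoopA_eq_find? (plate : List Char) (ys : List String) :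
    pvLoopA plate ys = ys.find? (fun w => pvVerifyA plate w.toList) := by
  induction ys with
  | nil => rfl
  | cons y ys ih => by_cases h : pvVerifyA plate y.toList = true <;> simp [pvLoopA, List.find?, h, ih]

-- find? through one stable insertion into a length-sorted list
theorem find?_insertBy (P : String → Bool) (x : String) (ys : List String)
    (hs : ys.Pairwise (fun a b => PySem.Str.len a ≤ PySem.Str.len b)) :
    (PySem.List.insertBy (fun a b => decide (PySem.Str.len a < PySem.Str.len b)) x ys).find? P
      = match ys.find? P with
        | none => if P x then some x else none
        | some b => if P x && decide (PySem.Str.len x < PySem.Str.len b) then some x else some b := by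
  induction ys with
  | nil =>
    rw [show PySem.List.insertBy (fun a b => decide (PySem.Str.len a < PySem.Str.len b)) x [] = [x] from rfl]
    cases hx : P x <;> simp [List.find?, hx]
  | cons y ys ih =>
    rw [List.pairwise_cons] at hs
    rw [show PySem.List.insertBy (fun a b => decide (PySem.Str.len a < PySem.Str.len b)) x (y :: ys)
        = if decide (PySem.Str.len x < PySem.Str.len y) = true then x :: y :: ys
          else y :: PySem.List.insertBy (fun a b => decide (PySem.Str.len a < PySem.Str.len b)) x ys from rfl]
    by_cases hb : PySem.Str.len x < PySem.Str.len y
    · rw [if_pos (decide_eq_true hb)]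
      cases hx : P x with
      | false =>
        rw [List.find?_cons_of_neg (by simp [hx])]
        cases hf : List.find? P (y :: ys) <;> simp_all
      | true =>
        rw [List.find?_cons_of_pos hx]
        cases hf : List.find? P (y :: ys) with
        | none => simp
        | some b =>
          have hmem : b ∈ y :: ys := List.mem_of_find?_eq_some hf
          have hlt : PySem.Str.len x < PySem.Str.len b := by
            rcases List.mem_cons.mp hmem with rfl | hb'
            · exact hb
            · exact lt_of_lt_of_le hb (hs.1 b hb')
          have hlt' : x.length < b.length := by simpa [PySem.Str.len_eq] using hlt
          simp [hlt']
    · rw [if_neg (by simpa using hb)]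
      cases hy : P y with
      | false =>
        rw [List.find?_cons_of_neg (by simp [hy]), ih hs.2, List.find?_cons_of_neg (by simp [hy])]
      | true =>
        rw [List.find?_cons_of_pos hy, List.find?_cons_of_pos hy]
        have hb' : ¬ x.length < y.length := by simpa [PySem.Str.len_eq] using hb
        simp [hb']

-- B's min-tracking pass computes find? over the stable length-sort
theorem foldl_best_eq_find_sorted (P : String → Bool) (ws : List String) :
    ws.foldl (fun best w =>
      if P w then
        match best with
        | none => some w
        | some b => if PySem.Str.len w < PySem.Str.len b then some w else some b
      else best) none
      = (PySem.List.sorted ws (fun w => PySem.Str.len w)).find? P := by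
  induction ws using List.reverseRecOn with
  | nil => rw [PySem.List.sorted_eq_foldl_insertBy]; rfl
  | append_singleton ws w ih =>
    rw [List.foldl_append, List.foldl_cons, List.foldl_nil, ih]
    conv_rhs => rw [PySem.List.sorted_eq_foldl_insertBy, List.foldl_append, List.foldl_cons,
      List.foldl_nil, ← PySem.List.sorted_eq_foldl_insertBy]
    rw [find?_insertBy P w _ (PySem.List.sorted_pairwise ws (fun w => PySem.Str.len w))]
    cases hf : List.find? P (PySem.List.sorted ws (fun w => PySem.Str.len w)) with
    | none => cases hw : P w <;> simp_all
    | some b => cases hw : P w <;> simp_all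

-- ===== VERDICT (by name: the statement is the Claim_ definition above) =====
theorem shortestWord_spec : Claim_equal_shortestWord := by
  intro lp words _
  unfold Spec_shortestWord shortestWord shortestWord_alt
  rw [pvLoopA_eq_find?]
  simp only [pvOkB_eq_verifyA]
  rw [foldl_best_eq_find_sorted]
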